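-- pv_equiv track=rewrite | github.com/blzzua/codewars | 7-kyu/adding_values_of_arrays_in_a_shifted_way.py | sum_arrays
-- ===== SOURCE A (Python) =====
-- from itertools import zip_longest
--
-- def sum_arrays(arrays, shift):
--     result = arrays[0]
--     shiftcnt = 0
--     for arr in arrays[1:]:
--         shiftcnt += 1
--         pad = [0,]*(shift*shiftcnt)
--         result = [sum(values) for values in zip_longest(result, pad + arr, fillvalue=0)]
--     return result
-- ===== SOURCE B (Python) =====
-- def sum_arrays(arrays, shift):
--     n = max(max(shift * i, 0) + len(a) for i, a in enumerate(arrays))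
--     res = [0] * n
--     for i, a in enumerate(arrays):
--         off = max(shift * i, 0)
--         for j, v in enumerate(a):
--             res[off + j] += v
--     return res
-- ===== Notes on version B (the rewrite author's own statement) =====
-- stated objective: faster
-- what changed: Instead of A's loop that rebuilds the whole running result with zip_longest for every array, B computes the final length once, preallocates the result, and adds each array's elements at its offset in a single pass.
-- outside the precondition, e.g. on sum_arrays([], 3): A raises IndexError, B raises ValueError
import Mathlib
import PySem

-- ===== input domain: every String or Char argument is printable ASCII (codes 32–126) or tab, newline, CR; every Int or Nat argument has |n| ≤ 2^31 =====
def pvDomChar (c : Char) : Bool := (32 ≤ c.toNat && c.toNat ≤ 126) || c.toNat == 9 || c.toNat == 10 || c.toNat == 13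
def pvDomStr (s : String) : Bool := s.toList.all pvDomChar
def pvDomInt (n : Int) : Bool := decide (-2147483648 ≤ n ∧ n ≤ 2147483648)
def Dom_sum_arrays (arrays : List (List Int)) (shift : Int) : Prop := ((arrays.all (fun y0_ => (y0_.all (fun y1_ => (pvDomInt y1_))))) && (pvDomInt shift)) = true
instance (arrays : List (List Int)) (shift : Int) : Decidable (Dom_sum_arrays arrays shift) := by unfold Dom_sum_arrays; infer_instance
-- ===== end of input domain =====

-- B adds each array once at its cumulative offset into a preallocated result
-- (O(total elements)) instead of A's repeated zip_longest rebuild of the whole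
-- prefix sum (O(n * final length)); equivalence is proved on nonempty `arrays`.

-- ===== PORT A =====
-- [sum(values) for values in zip_longest(xs, ys, fillvalue=0)], exact for int lists
def pyZipLongestAdd : List Int → List Int → List Int
  | [], [] => []
  | [], y :: ys => (0 + y) :: pyZipLongestAdd [] ys
  | x :: xs, [] => (x + 0) :: pyZipLongestAdd xs []
  | x :: xs, y :: ys => (x + y) :: pyZipLongestAdd xs ys

-- one iteration of A's loop body (state = (result, shiftcnt))
def stepA (shift : Int) (st : List Int × Int) (arr : List Int) : List Int × Int :=
  let shiftcnt := st.2 + 1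
  let pad : List Int := List.replicate (shift * shiftcnt).toNat 0  -- [0]*m is [] for m ≤ 0
  (pyZipLongestAdd st.1 (pad ++ arr), shiftcnt)

def sum_arrays (arrays : List (List Int)) (shift : Int) : List Int :=
  match arrays with
  | [] => []  -- Python: arrays[0] raises IndexError; excluded by Pre_
  | first :: rest => (rest.foldl (stepA shift) (first, 0)).1

-- ===== PORT B =====
-- inner loop of Source B: res[off+j] += v for j, v in enumerate(a); all indices are in range
def addArr (res : List Int) (off : Nat) (a : List Int) : List Int :=
  a.zipIdx.foldl (fun res q => res.set (off + q.2) (res.getD (off + q.2) 0 + q.1)) res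

-- one iteration of Source B's outer loop: off = max(shift*i, 0) = (shift*i).toNat
def stepB (shift : Int) (res : List Int) (p : List Int × Nat) : List Int :=
  addArr res (shift * (p.2 : Int)).toNat p.1

def sum_arrays_alt (arrays : List (List Int)) (shift : Int) : List Int :=
  match arrays with
  | [] => []  -- Python: max() over empty generator raises ValueError; excluded by Pre_
  | _ =>
    -- n = max(max(shift*i,0) + len(a) ...): Python max of a nonempty list of Nats = fold of Nat.max from 0
    let n : Nat := (arrays.zipIdx.map (fun p => (shift * (p.2 : Int)).toNat + p.1.length)).foldl Nat.max 0
    arrays.zipIdx.foldl (stepB shift) (List.replicate n 0)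

-- ===== PRECONDITION & SPEC =====
-- Pre_ excludes only arrays = [], on which A raises IndexError (and B raises ValueError).
def Pre_sum_arrays (arrays : List (List Int)) (shift : Int) : Prop := arrays ≠ []
instance (arrays : List (List Int)) (shift : Int) : Decidable (Pre_sum_arrays arrays shift) := by unfold Pre_sum_arrays; infer_instance

def pvWitness_sum_arrays : List (List Int) × Int := ([[1, 2, 3], [4, 5]], 2)

def Spec_sum_arrays (arrays : List (List Int)) (shift : Int) (out : List Int) : Prop := out = sum_arrays_alt arrays shift
instance (arrays : List (List Int)) (shift : Int) (out : List Int) : Decidable (Spec_sum_arrays arrays shift out) := by unfold Spec_sum_arrays; infer_instance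

-- ===== CLAIM (what is proved, stated in full; the proofs are below) =====
def Claim_equal_sum_arrays : Prop := ∀ (arrays : List (List Int)) (shift : Int), Dom_sum_arrays arrays shift → Pre_sum_arrays arrays shift → Spec_sum_arrays arrays shift (sum_arrays arrays shift)

-- ===== LEMMAS AND PROOFS =====

-- contribution of one array placed at offset `off` to position `k`
def contrib (off : Nat) (a : List Int) (k : Nat) : Int :=
  if k < off then 0 else a.getD (k - off) 0

-- total contribution at position `k` of the arrays, the i-th placed at offset (shift*(c+i)).toNat
def sumFrom (shift : Int) (k : Nat) : Nat → List (List Int) → Int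
  | _, [] => 0
  | c, a :: rest => contrib (shift * (c : Int)).toNat a k + sumFrom shift k (c + 1) rest

-- final length contributed by the arrays, the i-th placed at offset (shift*(c+i)).toNat
def maxFrom (shift : Int) : Nat → List (List Int) → Nat
  | _, [] => 0
  | c, a :: rest => Nat.max ((shift * (c : Int)).toNat + a.length) (maxFrom shift (c + 1) rest)

theorem zipAdd_length (xs ys : List Int) :
    (pyZipLongestAdd xs ys).length = Nat.max xs.length ys.length := by
  induction xs generalizing ys with
  | nil => induction ys with
    | nil => simp [pyZipLongestAdd]
    | cons y ys ih => simp [pyZipLongestAdd, ih]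
  | cons x xs ih =>
    cases ys with
    | nil => simp [pyZipLongestAdd, ih]
    | cons y ys => simp [pyZipLongestAdd, ih]

theorem zipAdd_getD (xs ys : List Int) (k : Nat) :
    (pyZipLongestAdd xs ys).getD k 0 = xs.getD k 0 + ys.getD k 0 := by
  induction xs generalizing ys k with
  | nil => induction ys generalizing k with
    | nil => simp [pyZipLongestAdd]
    | cons y ys ih =>
      cases k with
      | zero => simp [pyZipLongestAdd]
      | succ k => simpa [pyZipLongestAdd] using ih k
  | cons x xs ih =>
    cases ys with
    | nil =>
      cases k with
      | zero => simp [pyZipLongestAdd]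
      | succ k => simpa [pyZipLongestAdd] using ih [] k
    | cons y ys =>
      cases k with
      | zero => simp [pyZipLongestAdd]
      | succ k => simpa [pyZipLongestAdd] using ih ys k

theorem pad_getD (off : Nat) (a : List Int) (k : Nat) :
    (List.replicate off (0 : Int) ++ a).getD k 0 = contrib off a k := by
  induction off generalizing k with
  | zero => simp [contrib]
  | succ off ih =>
    cases k with
    | zero => simp [List.replicate_succ, contrib]
    | succ k => simpa [List.replicate_succ, contrib] using ih k

theorem getD_set (l : List Int) (i k : Nat) (v : Int) :
    (l.set i v).getD k 0 = if i = k ∧ i < l.length then v else l.getD k 0 := by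
  by_cases hik : i = k
  · subst hik
    by_cases hl : i < l.length
    · simp [List.getD, hl]
    · simp [List.getD, hl]
  · simp [List.getD, hik]

theorem foldA_len (shift : Int) (rest : List (List Int)) (acc : List Int) (c : Nat) :
    ((rest.foldl (stepA shift) (acc, (c : Int))).1).length
      = Nat.max acc.length (maxFrom shift (c + 1) rest) := by
  induction rest generalizing acc c with
  | nil => simp [maxFrom]
  | cons a rest ih =>
    have hc : ((c : Int) + 1) = ((c + 1 : Nat) : Int) := by push_cast; ring
    simp only [List.foldl_cons, stepA, hc]
    rw [ih]
    simp [maxFrom, zipAdd_length]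

theorem foldA_getD (shift : Int) (rest : List (List Int)) (acc : List Int) (c : Nat) (k : Nat) :
    ((rest.foldl (stepA shift) (acc, (c : Int))).1).getD k 0
      = acc.getD k 0 + sumFrom shift k (c + 1) rest := by
  induction rest generalizing acc c with
  | nil => simp [sumFrom]
  | cons a rest ih =>
    have hc : ((c : Int) + 1) = ((c + 1 : Nat) : Int) := by push_cast; ring
    simp only [List.foldl_cons, stepA, hc]
    rw [ih, zipAdd_getD, pad_getD]
    simp only [sumFrom]
    ring

theorem addArr_aux (off : Nat) (a : List Int) (j : Nat) (res : List Int)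
    (h : off + j + a.length ≤ res.length) :
    ((a.zipIdx j).foldl (fun res q => res.set (off + q.2) (res.getD (off + q.2) 0 + q.1)) res).length = res.length
    ∧ ∀ k, ((a.zipIdx j).foldl (fun res q => res.set (off + q.2) (res.getD (off + q.2) 0 + q.1)) res).getD k 0
        = res.getD k 0 + contrib (off + j) a k := by
  induction a generalizing j res with
  | nil =>
    refine ⟨by simp, fun k => ?_⟩
    simp [contrib, List.getD]
  | cons x a ih =>
    have hlt : off + j < res.length := by simp at h; omega
    simp only [List.zipIdx_cons, List.foldl_cons]
    set res' := res.set (off + j) (res.getD (off + j) 0 + x) with hres'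
    have hlen' : res'.length = res.length := by simp [hres']
    have h' : off + (j + 1) + a.length ≤ res'.length := by simp [hlen']; simp at h; omega
    obtain ⟨l1, l2⟩ := ih (j + 1) res' h'
    refine ⟨by rw [l1, hlen'], fun k => ?_⟩
    rw [l2 k, hres', getD_set]
    by_cases hk : off + j = k
    · subst hk
      simp [hlt, contrib]
    · rcases Nat.lt_trichotomy k (off + j) with h1 | h1 | h1
      · have h2 : k < off + (j + 1) := by omega
        simp [contrib, hk, h1, h2]
      · omega
      · have h2 : ¬ k < off + j := by omega
        have h3 : ¬ k < off + (j + 1) := by omega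
        have h4 : k - (off + j) = (k - (off + (j + 1))) + 1 := by omega
        simp [contrib, hk, h2, h3, h4]

theorem foldB (shift : Int) (l : List (List Int)) (c : Nat) (res : List Int)
    (h : maxFrom shift c l ≤ res.length) :
    ((l.zipIdx c).foldl (stepB shift) res).length = res.length
    ∧ ∀ k, ((l.zipIdx c).foldl (stepB shift) res).getD k 0 = res.getD k 0 + sumFrom shift k c l := by
  induction l generalizing c res with
  | nil => simp [sumFrom]
  | cons a l ih =>
    simp only [List.zipIdx_cons, List.foldl_cons]
    simp only [maxFrom, Nat.max_le] at h
    have step : stepB shift res (a, c) = addArr res (shift * (c : Int)).toNat a := rfl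
    rw [step]
    have haux := addArr_aux (shift * (c : Int)).toNat a 0 res (by omega)
    simp only [addArr]
    obtain ⟨a1, a2⟩ := haux
    obtain ⟨b1, b2⟩ := ih (c + 1) _ (by rw [a1]; omega)
    refine ⟨by rw [b1, a1], fun k => ?_⟩
    rw [b2 k, a2 k]
    simp [sumFrom]
    ring

theorem maxB (shift : Int) (l : List (List Int)) (c : Nat) (m : Nat) :
    ((l.zipIdx c).map (fun p => (shift * (p.2 : Int)).toNat + p.1.length)).foldl Nat.max m
      = Nat.max m (maxFrom shift c l) := by
  induction l generalizing c m with
  | nil => simp [maxFrom]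
  | cons a l ih =>
    simp only [List.zipIdx_cons, List.map_cons, List.foldl_cons, ih]
    simp [maxFrom]

theorem main_eq : ∀ (arrays : List (List Int)) (shift : Int), Pre_sum_arrays arrays shift →
    sum_arrays arrays shift = sum_arrays_alt arrays shift := by
  intro arrays shift pre
  match arrays with
  | [] => exact absurd rfl pre
  | first :: rest =>
    have hrepl : ∀ (m k : Nat), (List.replicate m (0:Int)).getD k 0 = 0 := by
      intro m k
      simp [List.getD, List.getElem?_replicate]
      split <;> simp
    have hA_len := foldA_len shift rest first 0
    have hA_getD : ∀ k, ((rest.foldl (stepA shift) (first, ((0:Nat) : Int))).1).getD k 0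
        = first.getD k 0 + sumFrom shift k (0 + 1) rest := fun k => foldA_getD shift rest first 0 k
    simp only [Nat.cast_zero, Nat.zero_add] at hA_len hA_getD
    have hrfl : sum_arrays_alt (first :: rest) shift
        = ((first :: rest).zipIdx).foldl (stepB shift)
            (List.replicate ((((first :: rest).zipIdx).map
              (fun p => (shift * (p.2 : Int)).toNat + p.1.length)).foldl Nat.max 0) 0) := rfl
    rw [show sum_arrays (first :: rest) shift = (rest.foldl (stepA shift) (first, 0)).1 from rfl, hrfl]
    set nB := (((first :: rest).zipIdx).map (fun p => (shift * (p.2 : Int)).toNat + p.1.length)).foldl Nat.max 0 with hnB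
    have hnB' : nB = maxFrom shift 0 (first :: rest) := by rw [hnB, maxB]; simp
    have hm0 : maxFrom shift 0 (first :: rest) = Nat.max first.length (maxFrom shift 1 rest) := by
      simp [maxFrom]
    obtain ⟨hBlen, hBgetD⟩ := foldB shift (first :: rest) 0 (List.replicate nB 0)
      (by simp [hnB'])
    apply List.ext_getElem
    · rw [hA_len, hBlen, List.length_replicate, hnB', hm0]
    · intro i h1 h2
      rw [← List.getD_eq_getElem _ 0 h1, ← List.getD_eq_getElem _ 0 h2, hA_getD i, hBgetD i, hrepl]
      simp [sumFrom, contrib]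

-- ===== VERDICT (by name: the statement is the Claim_ definition above) =====
theorem sum_arrays_spec : Claim_equal_sum_arrays := by
  intro arrays shift _dom pre
  unfold Spec_sum_arrays
  exact main_eq arrays shift pre
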